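-- pv_equiv track=rewrite | github.com/OMRYZUTA/database_ex_1 | ex1.py | is_valid_att_list
-- ===== SOURCE A (Python) =====
-- def is_valid_attribute(i_attribute, i_tables):
--     attribute = i_attribute.strip()
--     result = False
--     for table in i_tables:
--         if(attribute.startswith(table)):
--             result = (attribute == "Customers.Name" or attribute == "Customers.Age"
--                       or attribute == "Orders.CustomerName" or attribute == "Orders.Product" or attribute == "Orders.Price")
--
--     return result
--
-- def is_valid_att_list(i_att_list, i_tables):
--     att_list = i_att_list.strip()
--
--     if(is_valid_attribute(att_list, i_tables)):
--         result = True
--     else: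
--         comma_index = att_list.find(",")
--         if(comma_index == -1):
--             result = False
--         else:
--             result = is_valid_attribute(att_list[0:comma_index], i_tables) and is_valid_att_list(
--                 att_list[comma_index+1:], i_tables)
--
--     return result
-- ===== SOURCE B (Python) =====
-- WHITELIST = {"Customers.Name", "Customers.Age", "Orders.CustomerName",
--              "Orders.Product", "Orders.Price"}
--
--
-- def _valid_part(part, i_tables):
--     attribute = part.strip()
--     return attribute in WHITELIST and any(attribute.startswith(t) for t in i_tables)
--
--
-- def is_valid_att_list(i_att_list, i_tables):
--     parts = i_att_list.strip().split(",")
--     return all(_valid_part(p, i_tables) for p in parts)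
-- ===== Notes on version B (the rewrite author's own statement) =====
-- stated objective: simpler
-- what changed: Replaced A's recursive find(',')/slice descent and its per-table or-chain loop with a single split(',') plus all() over the parts, each part checked by set membership in the whitelist and any() over the tables.
import Mathlib
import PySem

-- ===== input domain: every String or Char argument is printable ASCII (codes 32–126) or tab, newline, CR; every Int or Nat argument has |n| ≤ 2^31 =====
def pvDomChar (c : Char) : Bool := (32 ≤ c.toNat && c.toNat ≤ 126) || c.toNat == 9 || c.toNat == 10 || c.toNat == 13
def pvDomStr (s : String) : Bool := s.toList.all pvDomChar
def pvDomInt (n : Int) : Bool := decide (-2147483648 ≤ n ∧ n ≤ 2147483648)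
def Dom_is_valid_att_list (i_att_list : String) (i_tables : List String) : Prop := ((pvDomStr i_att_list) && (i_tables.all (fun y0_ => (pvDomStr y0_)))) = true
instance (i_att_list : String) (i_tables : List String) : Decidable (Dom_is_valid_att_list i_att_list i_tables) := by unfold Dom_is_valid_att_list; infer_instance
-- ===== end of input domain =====

-- B replaces A's find(',')-slice-and-recurse scan with one split(',') pass checking every part
-- against a whitelist set membership plus any() (objective: simpler); return value only, no mutation.

-- needed by the port's termination proof (cited in decreasing_by)
theorem pvStripLen_le (l : List Char) : (PySem.Chars.strip l).length ≤ l.length := by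
  have h1 : (PySem.Chars.lstrip l).length ≤ l.length :=
    (List.dropWhile_sublist _).length_le
  have h2 : (PySem.Chars.rstrip (PySem.Chars.lstrip l)).length ≤ (PySem.Chars.lstrip l).length := by
    simpa [PySem.Chars.rstrip] using (List.dropWhile_sublist (l := (PySem.Chars.lstrip l).reverse) PySem.Chars.isspace).length_le
  exact le_trans h2 h1

-- ===== PORT A =====
def pvIsValidAttribute (i_attribute : List Char) (i_tables : List (List Char)) : Bool :=
  let attribute_ := PySem.Chars.strip i_attribute
  i_tables.foldl (fun result table =>
    if PySem.Chars.startswith attribute_ table then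
      (attribute_ == "Customers.Name".toList || attribute_ == "Customers.Age".toList ||
       attribute_ == "Orders.CustomerName".toList || attribute_ == "Orders.Product".toList ||
       attribute_ == "Orders.Price".toList)
    else result) false

def pvIsValidAttListCore (cs : List Char) (i_tables : List (List Char)) : Bool :=
  let att_list := PySem.Chars.strip cs
  if pvIsValidAttribute att_list i_tables then true
  else
    let comma_index := PySem.Chars.find att_list [',']
    if _h : comma_index = -1 then false
    else
      pvIsValidAttribute (PySem.Chars.slice att_list none (some comma_index)) i_tables &&
      pvIsValidAttListCore (PySem.Chars.slice att_list (some (comma_index + 1)) none) i_tables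
termination_by cs.length
decreasing_by
  have hne1 : PySem.Chars.find (PySem.Chars.strip cs) [','] ≠ -1 := _h
  have hge : 0 ≤ PySem.Chars.find (PySem.Chars.strip cs) [','] := by
    have := PySem.Chars.neg_one_le_find (PySem.Chars.strip cs) [',']
    omega
  have hinf : [','] <:+: PySem.Chars.strip cs := by
    by_contra hc
    exact hne1 ((PySem.Chars.find_eq_neg_one_iff _ _).2 hc)
  have hne : (PySem.Chars.strip cs).length ≠ 0 := by
    intro h0
    rw [List.length_eq_zero_iff] at h0
    rw [h0] at hinf
    simp at hinf
  have hlen := pvStripLen_le cs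
  have h1 : (0:Int) ≤ PySem.Chars.find (PySem.Chars.strip cs) [','] + 1 := by omega
  rw [PySem.Chars.slice_eq_listSlice, PySem.List.slice_from _ h1]
  have : (PySem.Chars.find (PySem.Chars.strip cs) [','] + 1).toNat ≥ 1 := by omega
  simp only [List.length_drop]
  omega

def is_valid_att_list (i_att_list : String) (i_tables : List String) : Bool :=
  pvIsValidAttListCore i_att_list.toList (i_tables.map String.toList)

-- ===== PORT B =====
def pvValidPart (part : List Char) (i_tables : List (List Char)) : Bool :=
  let attribute_ := PySem.Chars.strip part
  (PySem.Set.ofList ["Customers.Name".toList, "Customers.Age".toList, "Orders.CustomerName".toList,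
      "Orders.Product".toList, "Orders.Price".toList]).contains attribute_ &&
  i_tables.any (fun t => PySem.Chars.startswith attribute_ t)

def is_valid_att_list_alt (i_att_list : String) (i_tables : List String) : Bool :=
  (PySem.Chars.splitOn (PySem.Chars.strip i_att_list.toList) [',']).all
    (fun p => pvValidPart p (i_tables.map String.toList))

-- ===== PRECONDITION & SPEC =====
def Spec_is_valid_att_list (i_att_list : String) (i_tables : List String) (out : Bool) : Prop := out = is_valid_att_list_alt i_att_list i_tables
instance (i_att_list : String) (i_tables : List String) (out : Bool) : Decidable (Spec_is_valid_att_list i_att_list i_tables out) := by unfold Spec_is_valid_att_list; infer_instance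

-- ===== CLAIM (what is proved, stated in full; the proofs are below) =====
def Claim_equal_is_valid_att_list : Prop := ∀ (i_att_list : String) (i_tables : List String), Dom_is_valid_att_list i_att_list i_tables → Spec_is_valid_att_list i_att_list i_tables (is_valid_att_list i_att_list i_tables)

-- ===== LEMMAS AND PROOFS =====

-- prepend a chunk onto the head part (empty part list gets the chunk as its only part)
def pvChead (x : List Char) : List (List Char) → List (List Char)
  | [] => [x]
  | h :: t => (x ++ h) :: t

-- append a char onto the last part
def pvAlast : List (List Char) → Char → List (List Char)
  | [], c => [[c]]
  | [h], c => [h ++ [c]]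
  | h :: h' :: t, c => h :: pvAlast (h' :: t) c

-- structural model of str.split(",")
def pvSp : List Char → List (List Char)
  | [] => [[]]
  | c :: r => if c = ',' then [] :: pvSp r else pvChead [c] (pvSp r)

theorem pvSp_ne_nil (l : List Char) : pvSp l ≠ [] := by
  cases l with
  | nil => simp [pvSp]
  | cons c r =>
    simp only [pvSp]
    split
    · simp
    · cases h : pvSp r <;> simp [pvChead]

theorem pvChead_nil_of_ne (S : List (List Char)) (h : S ≠ []) : pvChead [] S = S := by
  cases S with
  | nil => exact absurd rfl h
  | cons a t => simp [pvChead]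

theorem pvChead_chead (x y : List Char) (S : List (List Char)) :
    pvChead x (pvChead y S) = pvChead (x ++ y) S := by
  cases S <;> simp [pvChead]

theorem pvGo_eq (fuel : Nat) (l cur : List Char) (acc : List (List Char))
    (hf : l.length < fuel) :
    PySem.Chars.splitOn.go [','] fuel l cur acc = acc.reverse ++ pvChead cur.reverse (pvSp l) := by
  induction fuel generalizing l cur acc with
  | zero => omega
  | succ f ih =>
    cases l with
    | nil => simp [PySem.Chars.splitOn.go, pvSp, pvChead]
    | cons c rest =>
      rw [PySem.Chars.splitOn.go]
      by_cases hc : c = ','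
      · subst hc
        have hp : [','].isPrefixOf (',' :: rest) = true := by simp [List.isPrefixOf]
        rw [if_pos hp]
        simp only [List.length_cons] at hf
        rw [ih _ _ _ (by simp; omega)]
        simp [pvSp, pvChead]
        cases h : pvSp rest with
        | nil => exact absurd h (pvSp_ne_nil rest)
        | cons p ps => simp
      · have hp : [','].isPrefixOf (c :: rest) = false := by
          simp [List.isPrefixOf]; exact fun h => absurd h.symm hc
        rw [if_neg (by simp [hp])]
        simp only [List.length_cons] at hf
        rw [ih _ _ _ (by omega)]
        simp [pvSp, hc, pvChead_chead]

theorem pvSplitOn_eq_sp (l : List Char) : PySem.Chars.splitOn l [','] = pvSp l := by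
  rw [PySem.Chars.splitOn, pvGo_eq _ _ _ _ (by omega)]
  simp [pvChead_nil_of_ne _ (pvSp_ne_nil l)]

theorem pvFoldIf (p : List Char → Bool) (w : Bool) (ts : List (List Char)) (r : Bool) :
    ts.foldl (fun result table => if p table then w else result) r =
      if ts.any p then w else r := by
  induction ts generalizing r with
  | nil => simp
  | cons t ts ih =>
    simp only [List.foldl_cons, List.any_cons, ih]
    by_cases h : p t = true <;> simp [h]

theorem pvOfListW :
    (PySem.Set.ofList ["Customers.Name".toList, "Customers.Age".toList, "Orders.CustomerName".toList,
      "Orders.Product".toList, "Orders.Price".toList] : List (List Char)) =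
    ["Customers.Name".toList, "Customers.Age".toList, "Orders.CustomerName".toList,
      "Orders.Product".toList, "Orders.Price".toList] := by decide

theorem pvHit_eq (a : List Char) :
    (a == "Customers.Name".toList || a == "Customers.Age".toList ||
     a == "Orders.CustomerName".toList || a == "Orders.Product".toList ||
     a == "Orders.Price".toList) =
    (PySem.Set.ofList ["Customers.Name".toList, "Customers.Age".toList, "Orders.CustomerName".toList,
      "Orders.Product".toList, "Orders.Price".toList]).contains a := by
  rw [pvOfListW]
  show _ = (["Customers.Name".toList, "Customers.Age".toList, "Orders.CustomerName".toList,
      "Orders.Product".toList, "Orders.Price".toList] : List (List Char)).contains a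
  simp only [List.contains_cons, List.contains_nil, Bool.or_false, Bool.or_assoc]

theorem pvValidAttr_eq (x : List Char) (ts : List (List Char)) :
    pvIsValidAttribute x ts = pvValidPart x ts := by
  unfold pvIsValidAttribute pvValidPart
  rw [pvFoldIf, pvHit_eq]
  by_cases h : ts.any (fun t => PySem.Chars.startswith (PySem.Chars.strip x) t) = true
  · simp [h]
  · simp only [Bool.not_eq_true] at h; simp [h]

-- strip lemmas
theorem pvLstrip_cons_space {c : Char} (hc : PySem.Chars.isspace c = true) (x : List Char) :
    PySem.Chars.lstrip (c :: x) = PySem.Chars.lstrip x := by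
  simp [PySem.Chars.lstrip, hc]

theorem pvStrip_cons_space {c : Char} (hc : PySem.Chars.isspace c = true) (x : List Char) :
    PySem.Chars.strip (c :: x) = PySem.Chars.strip x := by
  simp [PySem.Chars.strip, pvLstrip_cons_space hc]

theorem pvRstrip_append_space {c : Char} (hc : PySem.Chars.isspace c = true) (x : List Char) :
    PySem.Chars.rstrip (x ++ [c]) = PySem.Chars.rstrip x := by
  simp [PySem.Chars.rstrip, hc]

theorem pvRstrip_append_nospace {c : Char} (hc : PySem.Chars.isspace c = false) (x : List Char) :
    PySem.Chars.rstrip (x ++ [c]) = x ++ [c] := by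
  simp [PySem.Chars.rstrip, hc]

theorem pvStrip_append_space {c : Char} (hc : PySem.Chars.isspace c = true) (x : List Char) :
    PySem.Chars.strip (x ++ [c]) = PySem.Chars.strip x := by
  by_cases h : (PySem.Chars.lstrip x).isEmpty = true
  · have hx : PySem.Chars.lstrip x = [] := by simpa [List.isEmpty_iff] using h
    have h2 : PySem.Chars.lstrip (x ++ [c]) = [] := by
      simp only [PySem.Chars.lstrip] at hx ⊢
      rw [List.dropWhile_append, if_pos (by simp [hx])]
      simp [hc]
    rw [PySem.Chars.strip, PySem.Chars.strip, hx, h2]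
  · have h2 : PySem.Chars.lstrip (x ++ [c]) = PySem.Chars.lstrip x ++ [c] := by
      simp only [PySem.Chars.lstrip] at *
      rw [List.dropWhile_append, if_neg h]
    rw [PySem.Chars.strip, h2, pvRstrip_append_space hc]
    rfl

theorem pvValidPart_cons_space {c : Char} (hc : PySem.Chars.isspace c = true)
    (x : List Char) (ts : List (List Char)) : pvValidPart (c :: x) ts = pvValidPart x ts := by
  simp [pvValidPart, pvStrip_cons_space hc]

theorem pvValidPart_append_space {c : Char} (hc : PySem.Chars.isspace c = true)
    (x : List Char) (ts : List (List Char)) : pvValidPart (x ++ [c]) ts = pvValidPart x ts := by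
  simp [pvValidPart, pvStrip_append_space hc]

theorem pvMem_lstrip {c : Char} (hc : PySem.Chars.isspace c = false) {l : List Char}
    (h : c ∈ l) : c ∈ PySem.Chars.lstrip l := by
  induction l with
  | nil => simp at h
  | cons a t ih =>
    by_cases ha : PySem.Chars.isspace a = true
    · rw [pvLstrip_cons_space ha]
      rcases List.mem_cons.1 h with rfl | h'
      · rw [hc] at ha; exact absurd ha (by simp)
      · exact ih h'
    · simp only [PySem.Chars.lstrip, List.dropWhile_cons]
      simp only [Bool.not_eq_true] at ha
      simp [ha, h]

theorem pvMem_strip {c : Char} (hc : PySem.Chars.isspace c = false) {l : List Char}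
    (h : c ∈ l) : c ∈ PySem.Chars.strip l := by
  have h1 := pvMem_lstrip hc h
  have h2 : c ∈ (PySem.Chars.lstrip l).reverse := by simpa using h1
  have := pvMem_lstrip hc h2
  simpa [PySem.Chars.strip, PySem.Chars.rstrip, PySem.Chars.lstrip] using this

theorem pvValid_no_comma {x : List Char} {ts : List (List Char)}
    (h : pvValidPart x ts = true) : ',' ∉ x := by
  intro hm
  have hmem : ',' ∈ PySem.Chars.strip x := pvMem_strip (by decide) hm
  have hc : (["Customers.Name".toList, "Customers.Age".toList, "Orders.CustomerName".toList,
      "Orders.Product".toList, "Orders.Price".toList] : List (List Char)).contains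
        (PySem.Chars.strip x) = true := by
    simp only [pvValidPart, Bool.and_eq_true] at h
    have := h.1
    rwa [PySem.Set.contains, pvOfListW] at this
  have hw : PySem.Chars.strip x ∈ (["Customers.Name".toList, "Customers.Age".toList,
      "Orders.CustomerName".toList, "Orders.Product".toList, "Orders.Price".toList] :
      List (List Char)) := by simpa using hc
  simp only [List.mem_cons, List.not_mem_nil, or_false] at hw
  rcases hw with hw | hw | hw | hw | hw <;> rw [hw] at hmem <;> revert hmem <;> decide

theorem pvSp_no_comma {l : List Char} (h : ',' ∉ l) : pvSp l = [l] := by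
  induction l with
  | nil => rfl
  | cons c r ih =>
    have hc : c ≠ ',' := by rintro rfl; exact h (by simp)
    have hr : ',' ∉ r := fun hm => h (by simp [hm])
    simp [pvSp, hc, ih hr, pvChead]

theorem pvSp_decomp {u : List Char} (v : List Char) (h : ',' ∉ u) :
    pvSp (u ++ ',' :: v) = u :: pvSp v := by
  induction u with
  | nil => simp [pvSp]
  | cons c u' ih =>
    have hc : c ≠ ',' := by rintro rfl; exact h (by simp)
    have hu : ',' ∉ u' := fun hm => h (by simp [hm])
    simp [pvSp, hc, ih hu, pvChead]

theorem pvAlast_chead (x : List Char) (S : List (List Char)) (c : Char) :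
    pvAlast (pvChead x S) c = pvChead x (pvAlast S c) := by
  match S with
  | [] => simp [pvChead, pvAlast]
  | [h] => simp [pvChead, pvAlast]
  | h :: h' :: t => simp [pvChead, pvAlast]

theorem pvSp_append {c : Char} (hc : c ≠ ',') (xs : List Char) :
    pvSp (xs ++ [c]) = pvAlast (pvSp xs) c := by
  induction xs with
  | nil => simp [pvSp, hc, pvChead, pvAlast]
  | cons a xs ih =>
    by_cases ha : a = ','
    · subst ha
      simp only [List.cons_append, pvSp, if_pos, ih]
      have := pvSp_ne_nil xs
      cases h : pvSp xs with
      | nil => exact absurd h this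
      | cons p ps => cases ps <;> simp [pvAlast]
    · simp [pvSp, ha, ih, pvAlast_chead]

theorem pvAll_alast {c : Char} (hc : PySem.Chars.isspace c = true)
    (ts : List (List Char)) (S : List (List Char)) (hS : S ≠ []) :
    (pvAlast S c).all (fun p => pvValidPart p ts) = S.all (fun p => pvValidPart p ts) := by
  induction S with
  | nil => exact absurd rfl hS
  | cons h t ih =>
    cases t with
    | nil => simp [pvAlast, pvValidPart_append_space hc]
    | cons h' t' => simp [pvAlast, ih (by simp)]

theorem pvAll_sp_lstrip (ts : List (List Char)) (u : List Char) :
    (pvSp (PySem.Chars.lstrip u)).all (fun p => pvValidPart p ts) =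
      (pvSp u).all (fun p => pvValidPart p ts) := by
  induction u with
  | nil => rfl
  | cons c r ih =>
    by_cases hc : PySem.Chars.isspace c = true
    · have hcc : c ≠ ',' := by rintro rfl; exact absurd hc (by decide)
      rw [pvLstrip_cons_space hc, ih]
      simp only [pvSp, if_neg hcc]
      cases h : pvSp r with
      | nil => exact absurd h (pvSp_ne_nil r)
      | cons p ps => simp [pvChead, pvValidPart_cons_space hc]
    · simp only [Bool.not_eq_true] at hc
      simp [PySem.Chars.lstrip, hc]

theorem pvAll_sp_rstrip (ts : List (List Char)) (u : List Char) :
    (pvSp (PySem.Chars.rstrip u)).all (fun p => pvValidPart p ts) =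
      (pvSp u).all (fun p => pvValidPart p ts) := by
  induction u using List.reverseRecOn with
  | nil => rfl
  | append_singleton xs c ih =>
    by_cases hc : PySem.Chars.isspace c = true
    · have hcc : c ≠ ',' := by rintro rfl; exact absurd hc (by decide)
      rw [pvRstrip_append_space hc, ih, pvSp_append hcc,
        pvAll_alast hc ts _ (pvSp_ne_nil xs)]
    · simp only [Bool.not_eq_true] at hc
      rw [pvRstrip_append_nospace hc]

theorem pvAll_sp_strip (ts : List (List Char)) (u : List Char) :
    (pvSp (PySem.Chars.strip u)).all (fun p => pvValidPart p ts) =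
      (pvSp u).all (fun p => pvValidPart p ts) := by
  rw [PySem.Chars.strip, pvAll_sp_rstrip, pvAll_sp_lstrip]

theorem pvCore_eq (ts : List (List Char)) :
    ∀ (n : Nat) (cs : List Char), cs.length ≤ n →
      pvIsValidAttListCore cs ts = (pvSp (PySem.Chars.strip cs)).all (fun p => pvValidPart p ts) := by
  intro n
  induction n using Nat.strong_induction_on with
  | _ n ih =>
    intro cs hcs
    rw [pvIsValidAttListCore]
    set att := PySem.Chars.strip cs with hattdef
    by_cases hA : pvIsValidAttribute att ts = true
    · rw [if_pos hA]
      rw [pvValidAttr_eq] at hA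
      have hnc : ',' ∉ att := by
        intro hm
        exact pvValid_no_comma hA (by
          have : ',' ∈ PySem.Chars.strip att := pvMem_strip (by decide) hm
          exact hm)
      rw [pvSp_no_comma hnc]
      simp [hA]
    · rw [if_neg hA]
      by_cases hm1 : PySem.Chars.find att [','] = -1
      · rw [dif_pos hm1]
        have hni : ¬ [','] <:+: att := (PySem.Chars.find_eq_neg_one_iff _ _).1 hm1
        have hnc : ',' ∉ att := fun hm => hni ((List.singleton_infix_iff _ _).2 hm)
        rw [pvSp_no_comma hnc]
        rw [pvValidAttr_eq] at hA
        simp only [Bool.not_eq_true] at hA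
        simp [hA]
      · rw [dif_neg hm1]
        have hge : 0 ≤ PySem.Chars.find att [','] := by
          have := PySem.Chars.neg_one_le_find att [',']
          omega
        set i := PySem.Chars.find att [','] with hidef
        set k := i.toNat with hkdef
        obtain ⟨hpre, hmin⟩ := PySem.Chars.find_spec hge
        obtain ⟨v, hv⟩ : ∃ v, List.drop k att = ',' :: v := by
          obtain ⟨t, ht⟩ := hpre
          exact ⟨t, ht.symm⟩
        have hatt : att = List.take k att ++ ',' :: v := by
          conv_lhs => rw [← List.take_append_drop k att, hv]
        have hklen : k < att.length := by
          have : (List.drop k att).length ≠ 0 := by rw [hv]; simp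
          simp only [List.length_drop] at this
          omega
        have hncu : ',' ∉ List.take k att := by
          intro hmu
          obtain ⟨j, hj, hje⟩ := List.getElem_of_mem hmu
          have hjk : j < k := by
            have := hj
            simp only [List.length_take] at this
            omega
          apply hmin j hjk
          have hjl : j < att.length := by omega
          have hdj : List.drop j att = att[j] :: List.drop (j + 1) att :=
            (List.getElem_cons_drop hjl).symm
          rw [hdj, List.getElem_take] at *
          rw [hje] at hdj ⊢
          exact ⟨List.drop (j + 1) att, rfl⟩
        -- rewrite the two slices
        have hs1 : PySem.Chars.slice att none (some i) = List.take k att := by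
          rw [PySem.Chars.slice_eq_listSlice, PySem.List.slice_to _ hge]
        have hs2 : PySem.Chars.slice att (some (i + 1)) none = v := by
          rw [PySem.Chars.slice_eq_listSlice, PySem.List.slice_from _ (by omega)]
          have : (i + 1).toNat = k + 1 := by omega
          rw [this, ← List.drop_drop]
          rw [hv]
          simp
        rw [hs1, hs2]
        have hvlen : v.length < n := by
          have h1 : att.length ≤ cs.length := pvStripLen_le cs
          have h2 : v.length = att.length - (k + 1) := by
            have := congrArg List.length hv
            simp only [List.length_drop, List.length_cons] at this
            omega
          omega
        rw [ih v.length hvlen v le_rfl, pvAll_sp_strip]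
        conv_rhs => rw [hatt, pvSp_decomp v hncu]
        rw [pvValidAttr_eq]
        simp

-- ===== VERDICT (by name: the statement is the Claim_ definition above) =====
theorem is_valid_att_list_spec : Claim_equal_is_valid_att_list := by
  intro s ts _
  unfold Spec_is_valid_att_list is_valid_att_list is_valid_att_list_alt
  rw [pvCore_eq _ s.toList.length s.toList le_rfl, pvSplitOn_eq_sp]
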